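-- pv_equiv track=rewrite | github.com/FrandSX/sxbatcher-blender | sx_node_manager.py | sort_by_cost
-- ===== SOURCE A (Python) =====
-- def sort_by_cost(source_files, cost_dict):
--     cost_list = list(cost_dict.items())
--     cost_list.sort(key = lambda x: x[1])
--
--     sorted_source = []
--     for cost in cost_list:
--         for file in source_files:
--             if cost[0] in file:
--                 sorted_source.append(file)
--
--     return sorted_source
-- ===== SOURCE B (Python) =====
-- def sort_by_cost(source_files, cost_dict):
--     pairs = [(value, file)
--              for key, value in cost_dict.items()
--              for file in source_files
--              if key in file]
--     pairs.sort(key=lambda p: p[0])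
--     return [file for _, file in pairs]
-- ===== Notes on version B (the rewrite author's own statement) =====
-- stated objective: alternative
-- what changed: A sorts the cost items first and then runs the nested matching scan over them; B collects all (value, file) match pairs in dict/file order and performs a single stable sort by value at the end, then projects out the files.
import Mathlib
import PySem

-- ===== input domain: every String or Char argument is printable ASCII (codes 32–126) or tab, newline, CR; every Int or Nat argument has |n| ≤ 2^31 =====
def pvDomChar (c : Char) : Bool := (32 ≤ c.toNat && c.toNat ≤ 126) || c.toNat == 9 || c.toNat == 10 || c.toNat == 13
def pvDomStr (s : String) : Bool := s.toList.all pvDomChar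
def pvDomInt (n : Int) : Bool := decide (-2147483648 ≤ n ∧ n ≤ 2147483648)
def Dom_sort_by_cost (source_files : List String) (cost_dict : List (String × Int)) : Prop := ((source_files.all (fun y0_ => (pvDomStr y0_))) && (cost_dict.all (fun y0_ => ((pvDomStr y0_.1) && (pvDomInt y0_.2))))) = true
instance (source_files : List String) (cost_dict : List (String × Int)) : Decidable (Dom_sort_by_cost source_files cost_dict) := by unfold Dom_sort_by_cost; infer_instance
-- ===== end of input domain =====

-- B replaces A's sort-costs-then-nested-scan by collect-all-(value,file)-pairs-then-one-stable-sort; return value only, no claim beyond the theorems below.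

-- ===== PORT A =====
def sort_by_cost (source_files : List String) (cost_dict : List (String × Int)) : List String :=
  let cost_list := PySem.List.sorted cost_dict (fun x => x.2)
  cost_list.foldl (fun acc cost =>
    source_files.foldl (fun acc2 file =>
      if PySem.Str.isIn cost.1 file then acc2 ++ [file] else acc2) acc) []

-- ===== PORT B =====
def sort_by_cost_alt (source_files : List String) (cost_dict : List (String × Int)) : List String :=
  let pairs := cost_dict.flatMap (fun kv =>
    (source_files.filter (fun file => PySem.Str.isIn kv.1 file)).map (fun file => (kv.2, file)))
  (PySem.List.sorted pairs (fun p => p.1)).map (fun p => p.2)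

-- ===== PRECONDITION & SPEC =====
def Spec_sort_by_cost (source_files : List String) (cost_dict : List (String × Int)) (out : List String) : Prop := out = sort_by_cost_alt source_files cost_dict
instance (source_files : List String) (cost_dict : List (String × Int)) (out : List String) : Decidable (Spec_sort_by_cost source_files cost_dict out) := by unfold Spec_sort_by_cost; infer_instance

-- ===== CLAIM (what is proved, stated in full; the proofs are below) =====
def Claim_equal_sort_by_cost : Prop := ∀ (source_files : List String) (cost_dict : List (String × Int)), Dom_sort_by_cost source_files cost_dict → Spec_sort_by_cost source_files cost_dict (sort_by_cost source_files cost_dict)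

-- ===== LEMMAS AND PROOFS =====

-- insertBy passes over a prefix on which `before` is false
theorem insertBy_append_of_forall_not {α : Type} (before : α → α → Bool) (y : α)
    (as bs : List α) (h : ∀ a ∈ as, before y a = false) :
    PySem.List.insertBy before y (as ++ bs) = as ++ PySem.List.insertBy before y bs := by
  induction as with
  | nil => simp
  | cons a t ih =>
    have ha := h a (List.mem_cons_self)
    simp [PySem.List.insertBy, ha, ih (fun x hx => h x (List.mem_cons_of_mem a hx))]

-- insertBy drops in front when every element is strictly after y
theorem insertBy_eq_cons {α : Type} (before : α → α → Bool) (y : α)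
    (bs : List α) (h : ∀ b ∈ bs, before y b = true) :
    PySem.List.insertBy before y bs = y :: bs := by
  cases bs with
  | nil => simp [PySem.List.insertBy]
  | cons b t => simp [PySem.List.insertBy, h b List.mem_cons_self]

-- inserting a block of equal-key elements into as ++ bs, with as all ≤ and bs all >, appends the block between them
theorem foldl_insertBy_block {α : Type} (keyb : α → Int) (v : Int) :
    ∀ (ys as bs : List α), (∀ y ∈ ys, keyb y = v) → (∀ a ∈ as, ¬ v < keyb a) → (∀ b ∈ bs, v < keyb b) →
    ys.foldl (fun acc y => PySem.List.insertBy (fun p q => decide (keyb p < keyb q)) y acc) (as ++ bs)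
      = as ++ ys ++ bs := by
  intro ys
  induction ys with
  | nil => intro as bs _ _ _; simp
  | cons y t ih =>
    intro as bs hys has hbs
    have hy : keyb y = v := hys y List.mem_cons_self
    have step : PySem.List.insertBy (fun p q => decide (keyb p < keyb q)) y (as ++ bs)
        = (as ++ [y]) ++ bs := by
      rw [insertBy_append_of_forall_not _ _ _ _ (fun a ha => by
        simp only [decide_eq_false_iff_not]; rw [hy]; exact has a ha)]
      rw [insertBy_eq_cons _ _ _ (fun b hb => by
        simp only [decide_eq_true_eq]; rw [hy]; exact hbs b hb)]
      simp
    simp only [List.foldl_cons, step]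
    rw [ih (as ++ [y]) bs (fun x hx => hys x (List.mem_cons_of_mem y hx))
      (by intro a ha
          rcases List.mem_append.1 ha with h' | h'
          · exact has a h'
          · simp only [List.mem_singleton] at h'; subst h'; rw [hy]; exact lt_irrefl v)
      hbs]
    simp

-- the first element surviving dropWhile fails the predicate
theorem dropWhile_head_false {α : Type} (q : α → Bool) :
    ∀ (s : List α) (b0 : α) (t : List α), s.dropWhile q = b0 :: t → q b0 = false := by
  intro s
  induction s with
  | nil => intro b0 t h; simp at h
  | cons a u ih =>
    intro b0 t h
    rw [List.dropWhile_cons] at h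
    by_cases hq : q a
    · rw [if_pos hq] at h; exact ih b0 t h
    · rw [if_neg hq] at h; cases h; simpa using hq

-- stable sort commutes with flatMap when g preserves the key
theorem sorted_flatMap_comm {α β : Type} (key : α → Int) (keyb : β → Int)
    (g : α → List β) (hg : ∀ x, ∀ y ∈ g x, keyb y = key x) :
    ∀ l : List α,
      PySem.List.sorted (l.flatMap g) keyb = (PySem.List.sorted l key).flatMap g := by
  intro l
  induction l using List.reverseRecOn with
  | nil => simp [PySem.List.sorted_eq_foldl_insertBy]
  | append_singleton l x ih =>
    have hL : PySem.List.sorted ((l ++ [x]).flatMap g) keyb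
        = (g x).foldl (fun acc y => PySem.List.insertBy (fun p q => decide (keyb p < keyb q)) y acc)
            ((PySem.List.sorted l key).flatMap g) := by
      rw [PySem.List.sorted_eq_foldl_insertBy, List.flatMap_append, List.foldl_append]
      rw [← PySem.List.sorted_eq_foldl_insertBy, ih]
      simp
    set s := PySem.List.sorted l key with hs
    -- split s at the first element with key x < key
    have hsplit := List.takeWhile_append_dropWhile (p := fun a => !decide (key x < key a)) (l := s)
    set s1 := s.takeWhile (fun a => !decide (key x < key a)) with hs1
    set s2 := s.dropWhile (fun a => !decide (key x < key a)) with hs2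
    have hs1le : ∀ a ∈ s1, ¬ key x < key a := by
      intro a ha
      have := List.mem_takeWhile_imp ha
      simpa using this
    have hs2gt : ∀ b ∈ s2, key x < key b := by
      intro b hb
      cases hs2' : s2 with
      | nil => rw [hs2'] at hb; simp at hb
      | cons b0 t =>
        have hb0f : (!decide (key x < key b0)) = false :=
          dropWhile_head_false (fun a => !decide (key x < key a)) s b0 t (hs2.symm.trans hs2')
        have hb0 : key x < key b0 := by simpa using hb0f
        have hpair : s2.Pairwise (fun a b => key a ≤ key b) :=
          (PySem.List.sorted_pairwise l key).sublist (hs2 ▸ List.dropWhile_sublist _)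
        rw [hs2'] at hb hpair
        rcases List.mem_cons.1 hb with h' | h'
        · subst h'; exact hb0
        · exact lt_of_lt_of_le hb0 ((List.pairwise_cons.1 hpair).1 b h')
    have hflat : s.flatMap g = s1.flatMap g ++ s2.flatMap g := by
      rw [← List.flatMap_append, hsplit]
    rw [hL, hflat]
    rw [foldl_insertBy_block keyb (key x) (g x) (s1.flatMap g) (s2.flatMap g)
      (fun y hy => hg x y hy)
      (by intro a ha
          rcases List.mem_flatMap.1 ha with ⟨kv, hkv, hy⟩
          rw [hg kv a hy]; exact hs1le kv hkv)
      (by intro b hb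
          rcases List.mem_flatMap.1 hb with ⟨kv, hkv, hy⟩
          rw [hg kv b hy]; exact hs2gt kv hkv)]
    -- right-hand side
    have hR : PySem.List.sorted (l ++ [x]) key = s1 ++ x :: s2 := by
      rw [PySem.List.sorted_eq_foldl_insertBy, List.foldl_append, ← PySem.List.sorted_eq_foldl_insertBy, ← hs]
      simp only [List.foldl_cons, List.foldl_nil]
      rw [← hsplit]
      rw [insertBy_append_of_forall_not _ _ _ _ (fun a ha => by
        simp only [decide_eq_false_iff_not]; exact hs1le a ha)]
      rw [insertBy_eq_cons _ _ _ (fun b hb => by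
        simp only [decide_eq_true_eq]; exact hs2gt b hb)]
    rw [hR]
    simp

-- ===== VERDICT (by name: the statement is the Claim_ definition above) =====
theorem sort_by_cost_spec : Claim_equal_sort_by_cost := by
  intro source_files cost_dict _
  unfold Spec_sort_by_cost
  simp only [sort_by_cost, sort_by_cost_alt]
  rw [sorted_flatMap_comm (fun x => x.2) (fun p : Int × String => p.1) _
    (by intro x y hy; rcases List.mem_map.1 hy with ⟨f, _, rfl⟩; rfl)]
  rw [List.map_flatMap]
  rw [PySem.List.foldl_congr_mem _ _
    (fun acc cost => acc ++ (source_files.filter (fun file => PySem.Str.isIn cost.1 file)).map id) _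
    (by intro acc cost _; exact PySem.List.foldl_append_if (fun file => PySem.Str.isIn cost.1 file) id source_files acc)]
  rw [PySem.List.foldl_append_eq_flatMap]
  simp
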